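-- pv_equiv track=rewrite | github.com/passing2961/Stark | runner/base_runner.py | _sharding
-- ===== SOURCE A (Python) =====
-- def _sharding(input_list, shard_num=None):
--     shard_size = len(input_list) // shard_num
--     remainder = len(input_list) % shard_num
--
--     shards = []
--     for i in range(shard_num):
--         start_index = i * shard_size + min(i, remainder)
--         end_index = start_index + shard_size + (1 if i < remainder else 0)
--         if len(input_list[start_index:end_index]) == 0:
--             continue
--         shards.append(input_list[start_index:end_index])
--
--     return shards
-- ===== SOURCE B (Python) =====
-- def _sharding(input_list, shard_num=None):
--     shard_size, remainder = divmod(len(input_list), shard_num)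
--     shards = []
--     rest = input_list
--     for i in range(shard_num):
--         size = shard_size + 1 if i < remainder else shard_size
--         if size > 0:
--             shards.append(rest[:size])
--             rest = rest[size:]
--     return shards
-- ===== Notes on version B (the rewrite author's own statement) =====
-- stated objective: alternative
-- what changed: B replaces A's per-index closed-form boundary arithmetic (start = i*shard_size + min(i, remainder), slice of the original list) with a consuming cursor: divmod once, then repeatedly cut the next shard off the front of a shrinking suffix with rest[:size]/rest[size:].
import Mathlib
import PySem

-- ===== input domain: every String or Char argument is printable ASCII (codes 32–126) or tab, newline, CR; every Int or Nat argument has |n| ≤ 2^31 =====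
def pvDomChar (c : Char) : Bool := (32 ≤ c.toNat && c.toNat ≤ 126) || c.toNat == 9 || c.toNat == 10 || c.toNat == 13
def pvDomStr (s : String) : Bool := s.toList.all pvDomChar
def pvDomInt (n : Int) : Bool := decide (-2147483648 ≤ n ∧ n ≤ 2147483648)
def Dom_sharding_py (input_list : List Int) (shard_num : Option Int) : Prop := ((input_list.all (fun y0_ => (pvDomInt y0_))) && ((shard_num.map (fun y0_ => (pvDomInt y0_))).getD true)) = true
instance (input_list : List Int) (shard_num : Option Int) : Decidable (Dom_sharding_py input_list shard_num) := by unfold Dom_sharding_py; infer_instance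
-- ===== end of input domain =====

-- B splits the list by consuming a shrinking suffix with rest[:size]/rest[size:] instead of
-- recomputing closed-form start/end bounds per index (objective: alternative, same cost).

-- ===== PORT A =====
def sharding_py (input_list : List Int) (shard_num : Option Int) : List (List Int) :=
  match shard_num with
  | none => []   -- Python raises TypeError on None; excluded by Pre_
  | some n =>
    let shard_size := PySem.Int.floordiv (input_list.length : Int) n
    let remainder := PySem.Int.mod (input_list.length : Int) n
    (PySem.List.pyRange 0 n 1).foldl
      (fun shards i =>
        let start_index := i * shard_size + min i remainder
        let end_index := start_index + shard_size + (if i < remainder then 1 else 0)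
        let piece := PySem.List.slice input_list (some start_index) (some end_index)
        if piece.length == 0 then shards else shards ++ [piece]) []

-- ===== PORT B =====
def sharding_py_alt (input_list : List Int) (shard_num : Option Int) : List (List Int) :=
  match shard_num with
  | none => []   -- divmod(len, None) raises TypeError; excluded by Pre_
  | some n =>
    match PySem.Int.divmod? (input_list.length : Int) n with
    | none => []   -- n = 0: ZeroDivisionError; excluded by Pre_
    | some (shard_size, remainder) =>
      ((PySem.List.pyRange 0 n 1).foldl
        (fun (st : List (List Int) × List Int) i =>
          let size := if i < remainder then shard_size + 1 else shard_size
          if 0 < size then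
            (st.1 ++ [PySem.List.slice st.2 none (some size)],
             PySem.List.slice st.2 (some size) none)
          else st) ([], input_list)).1

-- ===== PRECONDITION & SPEC =====
-- Pre_ excludes exactly the inputs where the Python A raises: shard_num=None (TypeError) and shard_num=0 (ZeroDivisionError).
def Pre_sharding_py (input_list : List Int) (shard_num : Option Int) : Prop :=
  shard_num ≠ none ∧ shard_num ≠ some 0
instance (input_list : List Int) (shard_num : Option Int) : Decidable (Pre_sharding_py input_list shard_num) := by unfold Pre_sharding_py; infer_instance

def pvWitness_sharding_py : List Int × Option Int := ([1, 2, 3, 4, 5], some 2)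

def Spec_sharding_py (input_list : List Int) (shard_num : Option Int) (out : List (List Int)) : Prop := out = sharding_py_alt input_list shard_num
instance (input_list : List Int) (shard_num : Option Int) (out : List (List Int)) : Decidable (Spec_sharding_py input_list shard_num out) := by unfold Spec_sharding_py; infer_instance

-- ===== CLAIM (what is proved, stated in full; the proofs are below) =====
def Claim_equal_sharding_py : Prop := ∀ (input_list : List Int) (shard_num : Option Int), Dom_sharding_py input_list shard_num → Pre_sharding_py input_list shard_num → Spec_sharding_py input_list shard_num (sharding_py input_list shard_num)

-- ===== LEMMAS AND PROOFS =====

-- offset at step a stays within the list (0 ≤ a ≤ n)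
lemma shard_off_le (n q r a len : Int) (hq : 0 ≤ q)
    (hlen : q * n + r = len) (han : a ≤ n) :
    a * q + min a r ≤ len := by
  have h1 : a * q ≤ n * q := mul_le_mul_of_nonneg_right han hq
  have h2 : min a r ≤ r := min_le_right _ _
  nlinarith

-- the loop invariant: A's fold over the remaining range equals B's fold started from the
-- matching accumulator and the remaining suffix of the list
lemma shard_loop_eq (L : List Int) (n q r : Int)
    (hq : 0 ≤ q) (hr : 0 ≤ r)
    (hlen : q * n + r = (L.length : Int)) :
    ∀ (k : Nat) (a : Int) (acc : List (List Int)),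
      0 ≤ a → a + k = n →
      (PySem.List.pyRange a n 1).foldl
        (fun shards i =>
          let start_index := i * q + min i r
          let end_index := start_index + q + (if i < r then 1 else 0)
          let piece := PySem.List.slice L (some start_index) (some end_index)
          if piece.length == 0 then shards else shards ++ [piece]) acc
      =
      ((PySem.List.pyRange a n 1).foldl
        (fun (st : List (List Int) × List Int) i =>
          let size := if i < r then q + 1 else q
          if 0 < size then
            (st.1 ++ [PySem.List.slice st.2 none (some size)],
             PySem.List.slice st.2 (some size) none)
          else st) (acc, L.drop (a * q + min a r).toNat)).1 := by
  intro k
  induction k with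
  | zero =>
    intro a acc _ hak
    have : n ≤ a := by omega
    rw [PySem.List.pyRange_one_eq_nil this]
    simp
  | succ k ih =>
    intro a acc ha0 hak
    have haltn : a < n := by omega
    rw [PySem.List.pyRange_one_cons haltn]
    simp only [List.foldl_cons]
    set size : Int := if a < r then q + 1 else q with hsize
    have hsz0 : 0 ≤ size := by rw [hsize]; split <;> omega
    set s : Int := a * q + min a r with hs
    have hs0 : 0 ≤ s := by
      have : 0 ≤ min a r := le_min ha0 hr
      positivity
    have hnext : (a + 1) * q + min (a + 1) r = s + size := by
      rw [hs, hsize]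
      rcases lt_or_ge a r with h | h
      · rw [if_pos h, min_eq_left (by omega), min_eq_left (by omega)]; ring
      · rw [if_neg (by omega), min_eq_right (by omega), min_eq_right h]; ring
    have hend : a * q + min a r + q + (if a < r then 1 else 0) = s + size := by
      rw [hs, hsize]; split <;> ring
    have hse : s + size ≤ (L.length : Int) := by
      rw [← hnext]
      exact shard_off_le n q r (a + 1) _ hq hlen (by omega)
    -- the slice A takes in this step
    have hslice : PySem.List.slice L (some s) (some (s + size)) =
        (L.drop s.toNat).take size.toNat := by
      rw [PySem.List.slice_toNat L hs0 (by omega)]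
      congr 1
      omega
    have hlenp : ((L.drop s.toNat).take size.toNat).length = size.toNat := by
      simp only [List.length_take, List.length_drop]
      omega
    rw [hend, hslice]
    by_cases hpos : 0 < size
    · have hne : ¬ (((L.drop s.toNat).take size.toNat).length == 0) = true := by
        simp [hlenp]; omega
      simp only [hne, if_neg, Bool.false_eq_true, not_false_eq_true, if_pos hpos]
      rw [PySem.List.slice_to (L.drop s.toNat) (by omega : (0:Int) ≤ size),
          PySem.List.slice_from (L.drop s.toNat) (by omega : (0:Int) ≤ size)]
      have hdd : (L.drop s.toNat).drop size.toNat
          = L.drop ((a + 1) * q + min (a + 1) r).toNat := by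
        rw [List.drop_drop]; congr 1; omega
      rw [hdd]
      exact ih (a + 1) (acc ++ [(L.drop s.toNat).take size.toNat]) (by omega) (by omega)
    · have hsz : size = 0 := by omega
      have he : (((L.drop s.toNat).take size.toNat).length == 0) = true := by
        simp [hsz]
      simp only [he, if_pos, if_neg hpos]
      have hdd : (a * q + min a r).toNat = ((a + 1) * q + min (a + 1) r).toNat := by
        omega
      rw [hdd]
      exact ih (a + 1) acc (by omega) (by omega)

-- ===== VERDICT (by name: the statement is the Claim_ definition above) =====
theorem sharding_py_spec : Claim_equal_sharding_py := by
  intro input_list shard_num _ hpre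
  obtain ⟨hnone, hzero⟩ := hpre
  unfold Spec_sharding_py
  match shard_num with
  | none => exact absurd rfl hnone
  | some n =>
    have hn0 : n ≠ 0 := by intro h; exact hzero (by rw [h])
    simp only [sharding_py, sharding_py_alt, PySem.Int.divmod?, if_neg hn0]
    rcases lt_or_ge n 0 with hneg | hpos
    · rw [PySem.List.pyRange_one_eq_nil (by omega)]
      simp
    · have hnpos : 0 < n := lt_of_le_of_ne hpos (Ne.symm hn0)
      have hq : 0 ≤ PySem.Int.floordiv (input_list.length : Int) n := by
        rw [PySem.Int.floordiv_eq_ediv_of_pos hnpos]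
        exact Int.ediv_nonneg (by positivity) (by omega)
      have hr : 0 ≤ PySem.Int.mod (input_list.length : Int) n :=
        PySem.Int.mod_nonneg _ hnpos
      have hlen := PySem.Int.floordiv_mul_add_mod (input_list.length : Int) n
      have hfd : (input_list.length : Int).fdiv n = PySem.Int.floordiv (input_list.length : Int) n := rfl
      have hfm : (input_list.length : Int).fmod n = PySem.Int.mod (input_list.length : Int) n := rfl
      rw [hfd, hfm]
      have := shard_loop_eq input_list n
        (PySem.Int.floordiv (input_list.length : Int) n)
        (PySem.Int.mod (input_list.length : Int) n)
        hq hr hlen n.toNat 0 [] le_rfl (by omega)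
      simpa [min_eq_left hr] using this
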